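-- pv_equiv track=rewrite | github.com/tolliverdani/5001-Foundations-CS-Homework | 3_typing/sentence.py | count_mismatches
-- ===== SOURCE A (Python) =====
-- def count_mismatches(phrase_one, phrase_two):
--     ''' Function count_mismatches
--         Input: two strings for comparison
--         Returns: an int, the number of differences between the two strings.
--                  We count differences in each word (not each character).
--                  If the words at position i in each sentence differ at ALL,
--                  case included, that's a mismatch.
--                  If one sentence is longer than the other, each extra word
--                  it has is also a mismatch.
--     '''
--     list_one = phrase_one.split(' ')
--     list_two = phrase_two.split(' ')
--     min_length = min(len(list_one), len(list_two))
--
--     # Count the position-by-position mismatches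
--     errors = 0
--     for i in range(min_length):
--         if list_one[i] != list_two[i]:
--             errors += 1
--
--     # Add on any mismatches if one phrase was longer
--     errors += abs(len(list_one) - len(list_two))
--
--     return errors
-- ===== SOURCE B (Python) =====
-- def count_mismatches(phrase_one, phrase_two):
--     ''' Structural recursion over the two word lists in parallel:
--         heads are compared, a fully missing side is charged by its length. '''
--     def go(xs, ys):
--         if not xs or not ys:
--             return len(xs) + len(ys)
--         return int(xs[0] != ys[0]) + go(xs[1:], ys[1:])
--     return go(phrase_one.split(' '), phrase_two.split(' '))
-- ===== Notes on version B (the rewrite author's own statement) =====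
-- stated objective: alternative
-- what changed: Replaces the index loop over range(min_len) plus an abs(length difference) correction by a direct structural recursion that walks both word lists in parallel and charges a whole leftover tail by its length.
import Mathlib
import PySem

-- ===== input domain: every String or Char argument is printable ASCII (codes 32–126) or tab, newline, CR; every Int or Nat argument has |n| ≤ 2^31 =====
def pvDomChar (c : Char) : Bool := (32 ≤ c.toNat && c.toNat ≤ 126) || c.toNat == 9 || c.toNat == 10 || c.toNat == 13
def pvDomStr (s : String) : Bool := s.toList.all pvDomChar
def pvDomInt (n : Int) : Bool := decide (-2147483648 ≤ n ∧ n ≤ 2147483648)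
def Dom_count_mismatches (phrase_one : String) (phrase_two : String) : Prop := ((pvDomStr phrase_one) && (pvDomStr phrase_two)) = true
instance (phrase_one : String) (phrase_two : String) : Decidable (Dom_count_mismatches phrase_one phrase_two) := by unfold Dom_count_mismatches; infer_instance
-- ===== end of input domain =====

-- B replaces A's index loop over range(min_len) plus an abs(length-difference) correction
-- by a structural recursion walking both word lists in parallel (objective: alternative).


-- ===== PORT A =====
-- words are kept as List Char (Python str values compared for equality only)
def count_mismatches (phrase_one : String) (phrase_two : String) : Int :=
  let list_one := PySem.Chars.splitOn phrase_one.toList [' ']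
  let list_two := PySem.Chars.splitOn phrase_two.toList [' ']
  let min_length := min list_one.length list_two.length
  -- for i in range(min_length): if list_one[i] != list_two[i]: errors += 1
  -- (i < min_length always, so the in-range access list_one[i] is getD i [])
  let errors : Int :=
    (List.range min_length).foldl
      (fun e i => if list_one.getD i [] ≠ list_two.getD i [] then e + 1 else e) 0
  errors + ((((list_one.length : Int) - (list_two.length : Int)).natAbs : Int))

-- ===== PORT B =====
-- go(xs, ys): if not xs or not ys: len(xs)+len(ys) else (xs[0] != ys[0]) + go(xs[1:], ys[1:])
def cmGo : List (List Char) → List (List Char) → Int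
  | [], ys => (ys.length : Int)
  | x :: xs, [] => (((x :: xs).length : Nat) : Int)
  | x :: xs, y :: ys => (if x ≠ y then 1 else 0) + cmGo xs ys

def count_mismatches_alt (phrase_one : String) (phrase_two : String) : Int :=
  cmGo (PySem.Chars.splitOn phrase_one.toList [' ']) (PySem.Chars.splitOn phrase_two.toList [' '])

-- ===== PRECONDITION & SPEC =====
def Spec_count_mismatches (phrase_one : String) (phrase_two : String) (out : Int) : Prop := out = count_mismatches_alt phrase_one phrase_two
instance (phrase_one : String) (phrase_two : String) (out : Int) : Decidable (Spec_count_mismatches phrase_one phrase_two out) := by unfold Spec_count_mismatches; infer_instance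

-- ===== CLAIM (what is proved, stated in full; the proofs are below) =====
def Claim_equal_count_mismatches : Prop := ∀ (phrase_one : String) (phrase_two : String), Dom_count_mismatches phrase_one phrase_two → Spec_count_mismatches phrase_one phrase_two (count_mismatches phrase_one phrase_two)

-- ===== LEMMAS AND PROOFS =====
-- A's loop + |len₁ - len₂| equals B's parallel recursion, for ANY word lists and accumulator.
lemma cm_key (l1 : List (List Char)) : ∀ (l2 : List (List Char)) (e : Int),
    (List.range (min l1.length l2.length)).foldl
        (fun e i => if l1.getD i [] ≠ l2.getD i [] then e + 1 else e) e
      + (((l1.length : Int) - l2.length).natAbs : Int) = e + cmGo l1 l2 := by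
  induction l1 with
  | nil =>
    intro l2 e
    simp [cmGo]
  | cons x xs ih =>
    intro l2 e
    cases l2 with
    | nil =>
      simp [cmGo]
      omega
    | cons y ys =>
      simp only [List.length_cons, Nat.succ_min_succ, List.range_succ_eq_map,
        List.foldl_cons, List.foldl_map, List.getD_cons_succ, List.getD_cons_zero, cmGo]
      rw [show ((((xs.length + 1 : Nat)) : Int) - (((ys.length + 1 : Nat)) : Int)).natAbs
            = (((xs.length : Nat) : Int) - ((ys.length : Nat) : Int)).natAbs from by push_cast; omega]
      rw [ih ys]
      split_ifs <;> ring

-- ===== VERDICT (by name: the statement is the Claim_ definition above) =====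
theorem count_mismatches_spec : Claim_equal_count_mismatches := by
  intro p1 p2 _
  unfold Spec_count_mismatches count_mismatches count_mismatches_alt
  simpa using cm_key (PySem.Chars.splitOn p1.toList [' ']) (PySem.Chars.splitOn p2.toList [' ']) 0
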